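-- pv_equiv track=rewrite | github.com/paulologeh/advent-of-code | 2022/12_hill_climbing_algorithm/aoc202212.py | parse
-- ===== SOURCE A (Python) =====
-- def parse(puzzle_input):
--     """Parse input."""
--     grid = [list(line) for line in puzzle_input.split("\n")]
--     a_positions = []
--     start = end = None
--     for x, row in enumerate(grid):
--         for y, value in enumerate(row):
--             if value == "S":
--                 start = (x, y)
--                 grid[x][y] = "a"
--
--             if value == "E":
--                 end = (x, y)
--                 grid[x][y] = "z"
--
--             if grid[x][y] == "a":
--                 a_positions.append((x, y))
--
--     return grid, start, end, a_positions
-- ===== SOURCE B (Python) =====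
-- def parse(puzzle_input):
--     """Parse input."""
--     lines = puzzle_input.split("\n")
--     start = end = None
--     for x, line in enumerate(lines):
--         for y, c in enumerate(line):
--             if c == "S":
--                 start = (x, y)
--             elif c == "E":
--                 end = (x, y)
--     grid = [["a" if c == "S" else "z" if c == "E" else c for c in line] for line in lines]
--     a_positions = [(x, y) for x, row in enumerate(grid) for y, v in enumerate(row) if v == "a"]
--     return grid, start, end, a_positions
-- ===== Notes on version B (the rewrite author's own statement) =====
-- stated objective: alternative
-- what changed: A's single pass that interleaves grid mutation, start/end tracking and a-position collection is split into three independent phases: a plain loop over the raw lines recording start/end, a normalising comprehension building the grid without mutation, and a trailing comprehension collecting a_positions from the normalised grid.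
import Mathlib
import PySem

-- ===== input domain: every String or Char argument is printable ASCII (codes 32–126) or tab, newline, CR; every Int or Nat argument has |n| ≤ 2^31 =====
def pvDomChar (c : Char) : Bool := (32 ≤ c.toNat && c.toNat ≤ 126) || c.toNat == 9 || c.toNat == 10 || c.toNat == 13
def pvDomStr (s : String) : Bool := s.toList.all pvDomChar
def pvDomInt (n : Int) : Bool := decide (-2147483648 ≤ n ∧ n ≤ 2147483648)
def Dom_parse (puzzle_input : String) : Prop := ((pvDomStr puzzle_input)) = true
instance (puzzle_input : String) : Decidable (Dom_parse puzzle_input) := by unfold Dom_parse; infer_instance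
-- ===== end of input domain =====

-- B splits A's single mutating pass into three independent phases (start/end loop over the raw lines,
-- normalising comprehension for the grid, trailing comprehension for a-positions); objective: alternative.


-- ===== PORT A =====
-- body of A's doubly nested loop; grid[x][y] = v and the grid[x][y] read are pySetD/pyGetD
-- (indices produced by enumerate are always in range, so the total forms are exact here)
def parseCell (x y : Int) (value : String)
    (st : List (List String) × (Option (Int × Int)) × (Option (Int × Int)) × (List (Int × Int))) :
    List (List String) × (Option (Int × Int)) × (Option (Int × Int)) × (List (Int × Int)) :=
  let (grid, start, end_, aps) := st
  let start := if value = "S" then some (x, y) else start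
  let grid := if value = "S" then PySem.List.pySetD grid x (PySem.List.pySetD (PySem.List.pyGetD grid x []) y "a") else grid
  let end_ := if value = "E" then some (x, y) else end_
  let grid := if value = "E" then PySem.List.pySetD grid x (PySem.List.pySetD (PySem.List.pyGetD grid x []) y "z") else grid
  let aps := if PySem.List.pyGetD (PySem.List.pyGetD grid x []) y "" = "a" then aps ++ [(x, y)] else aps
  (grid, start, end_, aps)

-- A: grid = [list(line) for line in split], then one pass mutating grid and collecting everything.
-- (A's outer enumerate walks the live list, but each row is yielded before its own mutation and rows
-- never change length, so folding over the enumerated original rows is exact.)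
def parse (puzzle_input : String) : List (List String) × (Option (Int × Int)) × (Option (Int × Int)) × (List (Int × Int)) :=
  let grid : List (List String) :=
    (PySem.Chars.splitOn puzzle_input.toList ['\n']).map (fun line => line.map (fun c => toString c))
  (PySem.List.enumerate grid).foldl
    (fun st xr => (PySem.List.enumerate xr.2).foldl (fun st2 yv => parseCell xr.1 yv.1 yv.2 st2) st)
    (grid, none, none, [])

-- ===== PORT B =====
-- "a" if c == "S" else "z" if c == "E" else c
def bNorm (c : Char) : String := if c = 'S' then "a" else if c = 'E' then "z" else toString c

def parse_alt (puzzle_input : String) : List (List String) × (Option (Int × Int)) × (Option (Int × Int)) × (List (Int × Int)) :=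
  let lines := PySem.Chars.splitOn puzzle_input.toList ['\n']
  -- phase 1: the start/end loop over the raw lines (pair state)
  let se : Option (Int × Int) × Option (Int × Int) :=
    (PySem.List.enumerate lines).foldl
      (fun st xl => (PySem.List.enumerate xl.2).foldl
        (fun st2 yc =>
          if yc.2 = 'S' then (some (xl.1, yc.1), st2.2)
          else if yc.2 = 'E' then (st2.1, some (xl.1, yc.1))
          else st2)
        st)
      (none, none)
  -- phase 2: the normalising grid comprehension
  let grid := lines.map (fun line => line.map bNorm)
  -- phase 3: the a_positions comprehension over the normalised grid
  let aps := (PySem.List.enumerate grid).flatMap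
    (fun xr => (PySem.List.enumerate xr.2).filterMap
      (fun yv => if yv.2 = "a" then some (xr.1, yv.1) else none))
  (grid, se.1, se.2, aps)

-- ===== PRECONDITION & SPEC =====
def Spec_parse (puzzle_input : String) (out : List (List String) × (Option (Int × Int)) × (Option (Int × Int)) × (List (Int × Int))) : Prop := out = parse_alt puzzle_input
instance (puzzle_input : String) (out : List (List String) × (Option (Int × Int)) × (Option (Int × Int)) × (List (Int × Int))) : Decidable (Spec_parse puzzle_input out) := by unfold Spec_parse; infer_instance

-- ===== CLAIM (what is proved, stated in full; the proofs are below) =====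
def Claim_equal_parse : Prop := ∀ (puzzle_input : String), Dom_parse puzzle_input → Spec_parse puzzle_input (parse puzzle_input)

-- ===== LEMMAS AND PROOFS =====

-- proof-side value of a normalised cell
def normS (v : String) : String := if v = "S" then "a" else if v = "E" then "z" else v

-- last index of t in a row of strings
def lastIdx (row : List String) (t : String) : Option Nat :=
  match row with
  | [] => none
  | c :: r =>
    match lastIdx r t with
    | some i => some (i + 1)
    | none => if c = t then some 0 else none

-- last index of ch in a row of chars
def lastIdxC (cs : List Char) (ch : Char) : Option Nat :=
  match cs with
  | [] => none
  | c :: r =>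
    match lastIdxC r ch with
    | some i => some (i + 1)
    | none => if c = ch then some 0 else none

-- row-major a-positions of a row starting at column y0 (before normalisation)
def aPosRow (x y0 : Int) (row : List String) : List (Int × Int) :=
  match row with
  | [] => []
  | v :: r => (if normS v = "a" then [(x, y0)] else []) ++ aPosRow x (y0 + 1) r

-- "last occurrence over whole grid, rows x0.., seeded with s" (string rows)
def lastGrid (x0 : Nat) (rows : List (List String)) (t : String) (s : Option (Int × Int)) : Option (Int × Int) :=
  match rows with
  | [] => s
  | r :: rest =>
    lastGrid (x0 + 1) rest t
      (match lastIdx r t with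
       | some i => some ((x0 : Int), (i : Int))
       | none => s)

-- same, on char rows
def lastGridC (x0 : Nat) (rows : List (List Char)) (ch : Char) (s : Option (Int × Int)) : Option (Int × Int) :=
  match rows with
  | [] => s
  | r :: rest =>
    lastGridC (x0 + 1) rest ch
      (match lastIdxC r ch with
       | some i => some ((x0 : Int), (i : Int))
       | none => s)

def aPosGrid (x0 : Nat) (rows : List (List String)) : List (Int × Int) :=
  match rows with
  | [] => []
  | r :: rest => aPosRow (x0 : Int) 0 r ++ aPosGrid (x0 + 1) rest

theorem toString_char_eq_iff (c d : Char) : toString c = toString d ↔ c = d := by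
  constructor
  · intro h
    have h2 : (toString c).toList = (toString d).toList := congrArg String.toList h
    simp [toString] at h2
    simpa using h2
  · intro h; rw [h]

theorem normS_toString (c : Char) : normS (toString c) = bNorm c := by
  simp only [normS, bNorm]
  by_cases hS : c = 'S'
  · subst hS; decide
  · by_cases hE : c = 'E'
    · subst hE; decide
    · have h1 : toString c ≠ "S" := by
        intro h; exact hS ((toString_char_eq_iff c 'S').mp h)
      have h2 : toString c ≠ "E" := by
        intro h; exact hE ((toString_char_eq_iff c 'E').mp h)
      simp [h1, h2, hS, hE]

-- inner loop of A: one row, columns pre.length.., grid = U ++ (pre ++ suf) :: V with U.length = x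
theorem innerRow (x : Nat) (U V : List (List String)) (pre suf : List String)
    (s e : Option (Int × Int)) (aps : List (Int × Int)) (hU : U.length = x) :
    (PySem.List.enumerate suf (pre.length : Int)).foldl
        (fun st2 yv => parseCell (x : Int) yv.1 yv.2 st2)
        (U ++ (pre ++ suf) :: V, s, e, aps)
    = (U ++ (pre ++ suf.map normS) :: V,
       (match lastIdx suf "S" with
        | some i => some ((x : Int), ((pre.length + i : Nat) : Int))
        | none => s),
       (match lastIdx suf "E" with
        | some i => some ((x : Int), ((pre.length + i : Nat) : Int))
        | none => e),
       aps ++ aPosRow (x : Int) (pre.length : Int) suf) := by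
  induction suf generalizing pre s e aps with
  | nil => simp [PySem.List.enumerate, lastIdx, aPosRow]
  | cons v rest ih =>
    rw [PySem.List.enumerate_cons, List.foldl_cons]
    have hget : PySem.List.pyGetD (U ++ (pre ++ v :: rest) :: V) (x : Int) [] = pre ++ v :: rest := by
      subst hU; simp
    have hstep :
        parseCell (x : Int) (pre.length : Int) v (U ++ (pre ++ v :: rest) :: V, s, e, aps)
        = (U ++ (pre ++ normS v :: rest) :: V,
           (if v = "S" then some ((x : Int), (pre.length : Int)) else s),
           (if v = "E" then some ((x : Int), (pre.length : Int)) else e),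
           aps ++ (if normS v = "a" then [((x : Int), (pre.length : Int))] else [])) := by
      subst hU
      by_cases hS : v = "S"
      · simp [parseCell, hS, normS]
      · by_cases hE : v = "E"
        · simp [parseCell, hE, normS]
        · by_cases ha : v = "a" <;>
            simp [parseCell, hS, hE, ha, hget, normS]
    rw [hstep]
    have hc : ((pre.length : Int) + 1) = (((pre ++ [normS v]).length : Nat) : Int) := by
      simp
    have hl : pre ++ normS v :: rest = (pre ++ [normS v]) ++ rest := by simp
    rw [hc, hl, ih (pre ++ [normS v]) _ _ _]
    simp only [lastIdx, List.map_cons, List.length_append, List.length_cons, List.length_nil,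
      Prod.mk.injEq, List.append_assoc]
    refine ⟨by simp, ?_, ?_, ?_⟩
    · cases h : lastIdx rest "S" with
      | some i => simp; omega
      | none => by_cases hS : v = "S" <;> simp [hS]
    · cases h : lastIdx rest "E" with
      | some i => simp; omega
      | none => by_cases hE : v = "E" <;> simp [hE]
    · rw [show (aPosRow (x : Int) (((pre.length + (0 + 1) : Nat)) : Int) rest)
            = aPosRow (x : Int) ((pre.length : Int) + 1) rest by push_cast; ring_nf]
      simp [aPosRow]

-- outer loop of A over rows x0.., processed prefix G
theorem outerGrid (x0 : Nat) (G rows : List (List String))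
    (s e : Option (Int × Int)) (aps : List (Int × Int)) (hG : G.length = x0) :
    (PySem.List.enumerate rows (x0 : Int)).foldl
        (fun st xr => (PySem.List.enumerate xr.2).foldl (fun st2 yv => parseCell xr.1 yv.1 yv.2 st2) st)
        (G ++ rows, s, e, aps)
    = (G ++ rows.map (List.map normS),
       lastGrid x0 rows "S" s,
       lastGrid x0 rows "E" e,
       aps ++ aPosGrid x0 rows) := by
  induction rows generalizing x0 G s e aps with
  | nil => simp [PySem.List.enumerate, lastGrid, aPosGrid]
  | cons r rest ih =>
    rw [PySem.List.enumerate_cons, List.foldl_cons]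
    have := innerRow x0 G (rest) [] r s e aps hG
    simp only [List.nil_append, List.length_nil, Nat.cast_zero, Nat.zero_add] at this
    rw [show G ++ r :: rest = G ++ ([] ++ r) :: rest by simp] at this ⊢
    rw [this]
    have hc : ((x0 : Int) + 1) = (((x0 + 1 : Nat)) : Int) := by push_cast; ring
    have hl : G ++ r.map normS :: rest = (G ++ [r.map normS]) ++ rest := by simp
    rw [hc, hl, ih (x0 + 1) (G ++ [r.map normS]) _ _ _ (by simp [hG])]
    simp only [lastGrid, aPosGrid, List.map_cons, Prod.mk.injEq]
    exact ⟨by simp, trivial, trivial, by simp [List.append_assoc]⟩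

-- lastIdx on the stringified row = lastIdxC on the chars
theorem lastIdx_toString (line : List Char) (ch : Char) :
    lastIdx (line.map (fun c => toString c)) (toString ch) = lastIdxC line ch := by
  induction line with
  | nil => simp [lastIdx, lastIdxC]
  | cons c rest ih =>
    simp only [List.map_cons, lastIdx, lastIdxC, ih]
    cases h : lastIdxC rest ch with
    | some i => simp
    | none =>
      by_cases hc : c = ch
      · simp [hc]
      · have : toString c ≠ toString ch := fun h => hc ((toString_char_eq_iff c ch).mp h)
        simp [this, hc]

theorem lastGrid_toString (lines : List (List Char)) (ch : Char) (x0 : Nat) (s : Option (Int × Int)) :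
    lastGrid x0 (lines.map (List.map (fun c => toString c))) (toString ch) s
    = lastGridC x0 lines ch s := by
  induction lines generalizing x0 s with
  | nil => simp [lastGrid, lastGridC]
  | cons l rest ih =>
    simp only [List.map_cons, lastGrid, lastGridC, lastIdx_toString, ih]

-- B's inner start/end loop over one raw line
theorem innerSE (x y0 : Int) (line : List Char) (s e : Option (Int × Int)) :
    (PySem.List.enumerate line y0).foldl
      (fun st2 yc =>
        if yc.2 = 'S' then (some (x, yc.1), st2.2)
        else if yc.2 = 'E' then (st2.1, some (x, yc.1))
        else st2)
      (s, e)
    = ((match lastIdxC line 'S' with | some i => some (x, y0 + (i : Int)) | none => s),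
       (match lastIdxC line 'E' with | some i => some (x, y0 + (i : Int)) | none => e)) := by
  induction line generalizing y0 s e with
  | nil => simp [PySem.List.enumerate, lastIdxC]
  | cons c rest ih =>
    rw [PySem.List.enumerate_cons, List.foldl_cons]
    by_cases hS : c = 'S'
    · subst hS
      simp only [reduceIte]
      rw [ih (y0 + 1)]
      simp only [lastIdxC, reduceIte, Prod.mk.injEq]
      refine ⟨?_, ?_⟩
      · cases h : lastIdxC rest 'S' with
        | some i => simp; ring
        | none => simp
      · cases h : lastIdxC rest 'E' with
        | some i => simp; ring
        | none => simp
    · by_cases hE : c = 'E'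
      · subst hE
        simp only [reduceIte]
        rw [ih (y0 + 1)]
        simp only [lastIdxC, reduceIte, Prod.mk.injEq]
        refine ⟨?_, ?_⟩
        · cases h : lastIdxC rest 'S' with
          | some i => simp; ring
          | none => simp
        · cases h : lastIdxC rest 'E' with
          | some i => simp; ring
          | none => simp
      · simp only [hS, hE, reduceIte]
        rw [ih (y0 + 1)]
        simp only [lastIdxC, Prod.mk.injEq]
        refine ⟨?_, ?_⟩
        · cases h : lastIdxC rest 'S' with
          | some i => simp; ring
          | none => simp [hS]
        · cases h : lastIdxC rest 'E' with
          | some i => simp; ring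
          | none => simp [hE]

-- B's outer start/end loop
theorem outerSE (x0 : Nat) (lines : List (List Char)) (s e : Option (Int × Int)) :
    (PySem.List.enumerate lines (x0 : Int)).foldl
      (fun st xl => (PySem.List.enumerate xl.2).foldl
        (fun st2 yc =>
          if yc.2 = 'S' then (some (xl.1, yc.1), st2.2)
          else if yc.2 = 'E' then (st2.1, some (xl.1, yc.1))
          else st2)
        st)
      (s, e)
    = (lastGridC x0 lines 'S' s, lastGridC x0 lines 'E' e) := by
  induction lines generalizing x0 s e with
  | nil => simp [PySem.List.enumerate, lastGridC]
  | cons l rest ih =>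
    rw [PySem.List.enumerate_cons, List.foldl_cons]
    have h := innerSE (x0 : Int) 0 l s e
    simp only [Int.zero_add] at h
    rw [h]
    rw [show ((x0 : Int) + 1) = (((x0 + 1 : Nat)) : Int) by push_cast; ring, ih (x0 + 1)]
    simp only [lastGridC]

-- a-positions of one row = B's filterMap over the normalised row
theorem aPosRow_eq (x y0 : Int) (row : List String) :
    aPosRow x y0 row
    = (PySem.List.enumerate (row.map normS) y0).filterMap
        (fun yv => if yv.2 = "a" then some (x, yv.1) else none) := by
  induction row generalizing y0 with
  | nil => simp [aPosRow]
  | cons v rest ih =>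
    rw [List.map_cons, PySem.List.enumerate_cons]
    simp only [aPosRow, List.filterMap_cons]
    by_cases h : normS v = "a" <;> simp [h, ih]

theorem aPosGrid_eq (x0 : Nat) (rows : List (List String)) :
    aPosGrid x0 rows
    = (PySem.List.enumerate (rows.map (List.map normS)) (x0 : Int)).flatMap
        (fun xr => (PySem.List.enumerate xr.2).filterMap
          (fun yv => if yv.2 = "a" then some (xr.1, yv.1) else none)) := by
  induction rows generalizing x0 with
  | nil => simp [aPosGrid]
  | cons r rest ih =>
    rw [List.map_cons, PySem.List.enumerate_cons]
    simp only [aPosGrid, List.flatMap_cons]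
    rw [aPosRow_eq, show ((x0 : Int) + 1) = (((x0 + 1 : Nat)) : Int) by push_cast; ring, ih]

theorem map_normS_toString (line : List Char) :
    (line.map (fun c => toString c)).map normS = line.map bNorm := by
  rw [List.map_map]; exact List.map_congr_left (fun c _ => normS_toString c)

-- ===== VERDICT (by name: the statement is the Claim_ definition above) =====
theorem parse_spec : Claim_equal_parse := by
  intro puzzle_input _
  unfold Spec_parse
  simp only [parse, parse_alt]
  set lines := PySem.Chars.splitOn puzzle_input.toList ['\n'] with hlines
  have hmain := outerGrid 0 [] (lines.map (List.map (fun c => toString c))) none none [] rfl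
  simp only [List.nil_append, Nat.cast_zero] at hmain
  rw [hmain]
  have hse := outerSE 0 lines none none
  simp only [Nat.cast_zero] at hse
  rw [hse]
  have hgrid : (lines.map (List.map (fun c => toString c))).map (List.map normS)
      = lines.map (fun line => line.map bNorm) := by
    rw [List.map_map]; exact List.map_congr_left (fun l _ => map_normS_toString l)
  have hS := lastGrid_toString lines 'S' 0 none
  have hE := lastGrid_toString lines 'E' 0 none
  rw [show (toString 'S' : String) = "S" by decide] at hS
  rw [show (toString 'E' : String) = "E" by decide] at hE
  rw [hS, hE, aPosGrid_eq, hgrid]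
  simp
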